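-- pv_equiv track=rewrite | github.com/KrishnaMore19/Ai-Travel-Guide | backend/app/utils/helpers.py | parse_interests_tags
-- ===== SOURCE A (Python) =====
-- from typing import Dict, Any, Optional
--
-- def parse_interests_tags(interests: list) -> Dict[str, list]:
--     """
--     Categorize interests into groups
--
--     Args:
--         interests: List of interest tags
--
--     Returns:
--         Dictionary with categorized interests
--     """
--     categories = {
--         "adventure": ["hiking", "trekking", "climbing", "adventure", "outdoor", "safari", "camping"],
--         "culture": ["culture", "history", "museums", "art", "architecture", "heritage", "temples"],
--         "food": ["food", "cuisine", "dining", "culinary", "wine", "gastronomy"],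
--         "beach": ["beach", "coastal", "ocean", "seaside", "tropical", "island"],
--         "nature": ["nature", "wildlife", "scenery", "landscapes", "parks", "mountains"],
--         "city": ["city", "urban", "shopping", "nightlife", "entertainment", "modern"],
--         "relaxation": ["relaxation", "spa", "wellness", "yoga", "meditation", "retreat"]
--     }
--
--     result = {category: [] for category in categories.keys()}
--     result["other"] = []
--
--     for interest in interests:
--         interest_lower = interest.lower()
--         categorized = False
--
--         for category, keywords in categories.items():
--             if interest_lower in keywords:
--                 result[category].append(interest)
--                 categorized = True
--                 break
--
--         if not categorized:
--             result["other"].append(interest)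
--
--     # Remove empty categories
--     return {k: v for k, v in result.items() if v}
-- ===== SOURCE B (Python) =====
-- from typing import Dict
--
--
-- def parse_interests_tags(interests: list) -> Dict[str, list]:
--     """Categorize interests via a prebuilt keyword->category inverted index."""
--     categories = {
--         "adventure": ["hiking", "trekking", "climbing", "adventure", "outdoor", "safari", "camping"],
--         "culture": ["culture", "history", "museums", "art", "architecture", "heritage", "temples"],
--         "food": ["food", "cuisine", "dining", "culinary", "wine", "gastronomy"],
--         "beach": ["beach", "coastal", "ocean", "seaside", "tropical", "island"],
--         "nature": ["nature", "wildlife", "scenery", "landscapes", "parks", "mountains"],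
--         "city": ["city", "urban", "shopping", "nightlife", "entertainment", "modern"],
--         "relaxation": ["relaxation", "spa", "wellness", "yoga", "meditation", "retreat"]
--     }
--     index = {kw: cat for cat, kws in categories.items() for kw in kws}
--     result = {cat: [] for cat in categories}
--     result["other"] = []
--     for interest in interests:
--         result[index.get(interest.lower(), "other")].append(interest)
--     return {k: v for k, v in result.items() if v}
-- ===== Notes on version B (the rewrite author's own statement) =====
-- stated objective: faster
-- what changed: The nested per-interest scan over all categories' keyword lists (with a categorized flag and break) is replaced by a keyword-to-category inverted index dict built once, so each interest is classified by a single O(1) dict lookup with 'other' as the default.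
import Mathlib
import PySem

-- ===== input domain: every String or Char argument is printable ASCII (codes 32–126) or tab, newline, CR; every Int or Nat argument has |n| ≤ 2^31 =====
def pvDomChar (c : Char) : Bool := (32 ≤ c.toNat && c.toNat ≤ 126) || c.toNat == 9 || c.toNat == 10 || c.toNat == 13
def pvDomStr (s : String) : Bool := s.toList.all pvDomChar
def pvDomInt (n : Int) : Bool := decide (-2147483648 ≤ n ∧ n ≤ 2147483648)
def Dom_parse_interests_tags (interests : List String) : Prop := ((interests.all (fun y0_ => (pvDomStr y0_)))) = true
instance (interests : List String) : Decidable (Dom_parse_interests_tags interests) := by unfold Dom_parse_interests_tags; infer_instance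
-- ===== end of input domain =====

-- B replaces A's nested per-interest scan over the category keyword lists by a keyword→category
-- inverted index built once, classifying each interest with a single lookup (objective: idiomatic).

-- shared literal data: the categories table both Pythons spell out
def pvCategories : List (String × List String) :=
  [("adventure", ["hiking", "trekking", "climbing", "adventure", "outdoor", "safari", "camping"]),
   ("culture", ["culture", "history", "museums", "art", "architecture", "heritage", "temples"]),
   ("food", ["food", "cuisine", "dining", "culinary", "wine", "gastronomy"]),
   ("beach", ["beach", "coastal", "ocean", "seaside", "tropical", "island"]),
   ("nature", ["nature", "wildlife", "scenery", "landscapes", "parks", "mountains"]),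
   ("city", ["city", "urban", "shopping", "nightlife", "entertainment", "modern"]),
   ("relaxation", ["relaxation", "spa", "wellness", "yoga", "meditation", "retreat"])]

-- ===== PORT A =====
-- A's inner 'for category, keywords in categories.items(): if interest_lower in keywords: … break'
def pvFindCat : List (String × List String) → String → Option String
  | [], _ => none
  | (cat, kws) :: rest, s => if kws.contains s then some cat else pvFindCat rest s

def parse_interests_tags (interests : List String) : List (String × List String) :=
  let result := pvCategories.foldl (fun d p => d.insert p.1 ([] : List String)) PySem.Dict.empty
  let result := result.insert "other" []
  let result := interests.foldl (fun res interest =>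
      let il := PySem.Str.lower interest
      match pvFindCat pvCategories il with
      | some cat => res.modify cat [] (fun v => v ++ [interest])
      | none => res.modify "other" [] (fun v => v ++ [interest])) result
  (result.items.filter (fun p => !p.2.isEmpty))

-- ===== PORT B =====
-- Source B's inverted index: {kw: cat for cat, kws in categories.items() for kw in kws}
def pvIndex : PySem.Dict String String :=
  pvCategories.foldl (fun d p => p.2.foldl (fun d kw => d.insert kw p.1) d) PySem.Dict.empty

def parse_interests_tags_alt (interests : List String) : List (String × List String) :=
  let result := pvCategories.foldl (fun d p => d.insert p.1 ([] : List String)) PySem.Dict.empty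
  let result := result.insert "other" []
  let result := interests.foldl (fun res interest =>
      res.modify (pvIndex.getD (PySem.Str.lower interest) "other") [] (fun v => v ++ [interest])) result
  (result.items.filter (fun p => !p.2.isEmpty))

-- ===== PRECONDITION & SPEC =====
def Spec_parse_interests_tags (interests : List String) (out : List (String × List String)) : Prop := out = parse_interests_tags_alt interests
instance (interests : List String) (out : List (String × List String)) : Decidable (Spec_parse_interests_tags interests out) := by unfold Spec_parse_interests_tags; infer_instance

-- ===== CLAIM (what is proved, stated in full; the proofs are below) =====
def Claim_equal_parse_interests_tags : Prop := ∀ (interests : List String), Dom_parse_interests_tags interests → Spec_parse_interests_tags interests (parse_interests_tags interests)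

-- ===== LEMMAS AND PROOFS =====

-- lookup in a block of (keyword, cat) pairs = membership scan of the keyword list
theorem pvGetD_block (kws : List String) (cat : String) (rest : List (String × String))
    (s d : String) :
    (PySem.Dict.mk ((kws.map fun kw => (kw, cat)) ++ rest)).getD s d
      = if kws.contains s then cat else (PySem.Dict.mk rest).getD s d := by
  induction kws with
  | nil => simp
  | cons k ks ih =>
    by_cases h : k = s
    · subst h
      simp [PySem.Dict.getD_eq_get?_getD, PySem.Dict.get?_mk_cons]
    · have h' : s ≠ k := fun e => h e.symm
      simp only [List.map_cons, List.cons_append, PySem.Dict.getD_eq_get?_getD,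
        PySem.Dict.get?_mk_cons, List.contains_cons]
      simp [h, h', ← PySem.Dict.getD_eq_get?_getD, ih]

-- A's first-matching-category scan = lookup in the flattened (keyword, cat) association list
theorem pvFind_getD (cats : List (String × List String)) (s d : String) :
    (match pvFindCat cats s with | some c => c | none => d)
      = (PySem.Dict.mk (cats.flatMap fun p => p.2.map fun kw => (kw, p.1))).getD s d := by
  induction cats with
  | nil => simp [pvFindCat, PySem.Dict.getD_eq_get?_getD, PySem.Dict.get?]
  | cons p rest ih =>
    obtain ⟨cat, kws⟩ := p
    simp only [pvFindCat, List.flatMap_cons]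
    rw [pvGetD_block]
    by_cases h : s ∈ kws
    · simp [h]
    · simp [h, ih]

set_option maxRecDepth 4000 in
-- the per-string categorizers agree: A's scan = B's inverted-index lookup
theorem pvCat_eq (s : String) :
    (match pvFindCat pvCategories s with
     | some cat => cat
     | none => "other") = pvIndex.getD s "other" := by
  have hidx : pvIndex = PySem.Dict.mk
      (pvCategories.flatMap fun p => p.2.map fun kw => (kw, p.1)) := by decide
  rw [hidx]
  exact pvFind_getD pvCategories s "other"

theorem pvStep_eq (res : PySem.Dict String (List String)) (interest : String) :
    (let il := PySem.Str.lower interest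
     match pvFindCat pvCategories il with
     | some cat => res.modify cat [] (fun v => v ++ [interest])
     | none => res.modify "other" [] (fun v => v ++ [interest])) =
    res.modify (pvIndex.getD (PySem.Str.lower interest) "other") [] (fun v => v ++ [interest]) := by
  have h := pvCat_eq (PySem.Str.lower interest)
  cases hf : pvFindCat pvCategories (PySem.Str.lower interest) <;>
    simp only [hf] at h ⊢ <;> rw [← h]

-- ===== VERDICT (by name: the statement is the Claim_ definition above) =====
theorem parse_interests_tags_spec : Claim_equal_parse_interests_tags := by
  intro interests _
  unfold Spec_parse_interests_tags parse_interests_tags parse_interests_tags_alt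
  have h : (fun (res : PySem.Dict String (List String)) (interest : String) =>
      let il := PySem.Str.lower interest
      match pvFindCat pvCategories il with
      | some cat => res.modify cat [] (fun v => v ++ [interest])
      | none => res.modify "other" [] (fun v => v ++ [interest])) =
      (fun res interest =>
      res.modify (pvIndex.getD (PySem.Str.lower interest) "other") [] (fun v => v ++ [interest])) := by
    funext res interest
    exact pvStep_eq res interest
  rw [h]
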